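-- pv_equiv track=rewrite | github.com/AbdullahSoulat/Hanging-Man | testing.py | num_of_missing_char
-- ===== SOURCE A (Python) =====
-- def num_of_missing_char(word, difficulty):
--     length = len (word)
--     if difficulty == "Easy":
--         missing = 3
--         while (length - missing) < 5:
--             missing -= 1
--     elif difficulty == "Medium":
--         missing = 7
--         while (length - missing) < 3:
--             missing -= 1
--     elif difficulty == "Hard":
--         missing = 20
--         while (length - missing) < 2:
--             missing -= 1
--
--     return missing
-- ===== SOURCE B (Python) =====
-- def num_of_missing_char(word, difficulty):
--     length = len(word)
--     if difficulty == "Easy":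
--         missing = min(3, length - 5)
--     elif difficulty == "Medium":
--         missing = min(7, length - 3)
--     elif difficulty == "Hard":
--         missing = min(20, length - 2)
--     return missing
-- ===== Notes on version B (the rewrite author's own statement) =====
-- stated objective: simpler
-- what changed: Each decrement-while loop is replaced by its closed form min(start, length - threshold); the if/elif dispatch is kept, so an unknown difficulty still raises UnboundLocalError and is excluded by Pre_.
import Mathlib
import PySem

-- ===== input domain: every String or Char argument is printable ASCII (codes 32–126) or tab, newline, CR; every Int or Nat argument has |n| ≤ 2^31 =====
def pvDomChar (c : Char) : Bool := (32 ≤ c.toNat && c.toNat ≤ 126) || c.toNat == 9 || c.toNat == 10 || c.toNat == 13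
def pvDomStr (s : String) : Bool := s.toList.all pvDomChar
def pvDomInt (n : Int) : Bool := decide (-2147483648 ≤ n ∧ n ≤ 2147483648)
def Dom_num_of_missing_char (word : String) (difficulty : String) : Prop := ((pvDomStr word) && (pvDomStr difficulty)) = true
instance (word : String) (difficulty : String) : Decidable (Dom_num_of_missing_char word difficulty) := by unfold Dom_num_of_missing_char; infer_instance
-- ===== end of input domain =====

-- B replaces each decrement-while loop by its closed form min(start, length - threshold); same dispatch, equal return value on the three recognized difficulties (Pre_).

-- ===== PORT A =====
-- the 'while (length - missing) < thr: missing -= 1' loop of A, literally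
def pvLoopA (length thr missing : Int) : Int :=
  if length - missing < thr then pvLoopA length thr (missing - 1) else missing
termination_by (thr - (length - missing)).toNat
decreasing_by omega

def num_of_missing_char (word : String) (difficulty : String) : Int :=
  let length := PySem.Str.len word
  if difficulty = "Easy" then pvLoopA length 5 3
  else if difficulty = "Medium" then pvLoopA length 3 7
  else if difficulty = "Hard" then pvLoopA length 2 20
  else 0  -- unreachable under Pre_ (Python raises UnboundLocalError here)

-- ===== PORT B =====
def num_of_missing_char_alt (word : String) (difficulty : String) : Int :=
  let length := PySem.Str.len word
  if difficulty = "Easy" then min 3 (length - 5)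
  else if difficulty = "Medium" then min 7 (length - 3)
  else if difficulty = "Hard" then min 20 (length - 2)
  else 0  -- unreachable under Pre_ (Python raises UnboundLocalError here)

-- ===== PRECONDITION & SPEC =====
-- Pre_ excludes exactly the difficulties on which Python A raises UnboundLocalError (no branch assigns 'missing').
def Pre_num_of_missing_char (word : String) (difficulty : String) : Prop :=
  difficulty = "Easy" ∨ difficulty = "Medium" ∨ difficulty = "Hard"
instance (word : String) (difficulty : String) : Decidable (Pre_num_of_missing_char word difficulty) := by unfold Pre_num_of_missing_char; infer_instance

def pvWitness_num_of_missing_char : String × String := ("hangman", "Easy")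

def Spec_num_of_missing_char (word : String) (difficulty : String) (out : Int) : Prop := out = num_of_missing_char_alt word difficulty
instance (word : String) (difficulty : String) (out : Int) : Decidable (Spec_num_of_missing_char word difficulty out) := by unfold Spec_num_of_missing_char; infer_instance

-- ===== CLAIM (what is proved, stated in full; the proofs are below) =====
def Claim_equal_num_of_missing_char : Prop := ∀ (word : String) (difficulty : String), Dom_num_of_missing_char word difficulty → Pre_num_of_missing_char word difficulty → Spec_num_of_missing_char word difficulty (num_of_missing_char word difficulty)

-- ===== LEMMAS AND PROOFS =====
theorem pvLoopA_eq_min (length thr missing : Int) :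
    pvLoopA length thr missing = min missing (length - thr) := by
  by_cases h : length - missing < thr
  · rw [pvLoopA.eq_def, if_pos h, pvLoopA_eq_min]
    omega
  · rw [pvLoopA.eq_def, if_neg h]
    omega
termination_by (thr - (length - missing)).toNat
decreasing_by omega

-- ===== VERDICT (by name: the statement is the Claim_ definition above) =====
theorem num_of_missing_char_spec : Claim_equal_num_of_missing_char := by
  intro word difficulty _ hpre
  unfold Spec_num_of_missing_char num_of_missing_char num_of_missing_char_alt
  rcases hpre with h | h | h <;> simp [h, pvLoopA_eq_min]
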